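-- pv_equiv track=rewrite | github.com/Oatmeal-Health/regina_barzilay_group_sybil | sybil/datasets/nlst.py | get_thinnest_cut
-- ===== SOURCE A (Python) =====
-- def get_thinnest_cut(exam_dict):
--     # volume that is not thin cut might be the one annotated; or there are multiple volumes with same num slices, so:
--     # use annotated if available, otherwise use thinnest cut
--     # possibly_annotated_series = [
--     #     s in self.annotations_metadata
--     #     for s in list(exam_dict["image_series"].keys())
--     # ]
--     series_lengths = [
--         len(exam_dict["image_series"][series_id]["paths"])
--         for series_id in exam_dict["image_series"].keys()
--     ]
--     thinnest_series_len = max(series_lengths)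
--     thinnest_series_id = [
--         k
--         for k, v in exam_dict["image_series"].items()
--         if len(v["paths"]) == thinnest_series_len
--     ]
--     # if any(possibly_annotated_series):
--     #     thinnest_series_id = list(exam_dict["image_series"].keys())[
--     #         possibly_annotated_series.index(1)
--     #     ]
--     # else:
--     thinnest_series_id = thinnest_series_id[0]
--     return thinnest_series_id
-- ===== SOURCE B (Python) =====
-- def get_thinnest_cut(exam_dict):
--     # Sort the series by path count, descending; the stable sort keeps the
--     # first-inserted key first among ties, so ranked[0] is A's answer.
--     ranked = sorted(exam_dict["image_series"].items(),
--                     key=lambda kv: len(kv[1]["paths"]), reverse=True)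
--     return ranked[0][0]
-- ===== Notes on version B (the rewrite author's own statement) =====
-- stated objective: alternative
-- what changed: Replaces A's three staged passes (list of lengths, max over it, filter keys with the max length and take [0]) by a stable descending sort of the series items by path count followed by taking the first ranked item; stability under reverse=True keeps the first maximal key first, reproducing A's tie choice.
import Mathlib
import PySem

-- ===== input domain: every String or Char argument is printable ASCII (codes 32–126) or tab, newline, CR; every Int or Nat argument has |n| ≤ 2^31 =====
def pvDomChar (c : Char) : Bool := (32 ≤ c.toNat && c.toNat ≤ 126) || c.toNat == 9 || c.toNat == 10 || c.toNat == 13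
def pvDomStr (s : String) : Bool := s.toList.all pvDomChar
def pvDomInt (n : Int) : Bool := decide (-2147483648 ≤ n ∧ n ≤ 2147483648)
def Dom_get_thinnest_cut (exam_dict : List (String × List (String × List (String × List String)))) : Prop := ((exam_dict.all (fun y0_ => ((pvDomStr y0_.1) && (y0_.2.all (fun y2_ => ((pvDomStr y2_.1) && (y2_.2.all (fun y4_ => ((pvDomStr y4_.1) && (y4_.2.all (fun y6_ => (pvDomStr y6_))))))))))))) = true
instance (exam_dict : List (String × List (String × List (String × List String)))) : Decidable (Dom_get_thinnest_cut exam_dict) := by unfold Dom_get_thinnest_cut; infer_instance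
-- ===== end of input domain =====

-- B replaces A's three staged passes (length list, max, filter + [0]) by a stable
-- descending sort of the series items by path count and taking the first ranked item;
-- stability under reverse=True keeps the first maximal key first, matching A's tie choice.


-- ===== PORT A =====
-- len(v["paths"]); the 0 in the none branch is never claimed (a missing "paths" is a
-- Python KeyError, excluded by Pre_); used by both ports, both Pythons compute it.
def pvPathsLen (v : List (String × List String)) : Nat :=
  match (PySem.Dict.ofList v).get? "paths" with
  | some p => p.length
  | none => 0

def get_thinnest_cut (exam_dict : List (String × List (String × List (String × List String)))) : String :=
  match (PySem.Dict.ofList exam_dict).get? "image_series" with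
  | none => ""   -- Python KeyError; outside Pre_
  | some img =>
    let d := PySem.Dict.ofList img
    let series_lengths := d.items.map (fun kv => pvPathsLen kv.2)
    match PySem.List.max? series_lengths (fun x => x) with
    | none => ""   -- max([]) is a Python ValueError; outside Pre_
    | some m =>
      let thinnest_series_id := (d.items.filter (fun kv => pvPathsLen kv.2 == m)).map (·.1)
      thinnest_series_id.headD ""   -- [0]; nonempty here, the default is never claimed

-- ===== PORT B =====
def get_thinnest_cut_alt (exam_dict : List (String × List (String × List (String × List String)))) : String :=
  match (PySem.Dict.ofList exam_dict).get? "image_series" with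
  | none => ""   -- Python KeyError; outside Pre_
  | some img =>
    let ranked := PySem.List.sorted (PySem.Dict.ofList img).items (fun kv => pvPathsLen kv.2) true
    match PySem.List.pyGet? ranked 0 with   -- ranked[0]
    | some kv => kv.1
    | none => ""   -- IndexError on an empty dict; outside Pre_

-- ===== PRECONDITION & SPEC =====
-- Pre_ = exactly where the Python A returns: "image_series" present, nonempty, and
-- every series carries a "paths" key (otherwise A raises KeyError/ValueError).
def Pre_get_thinnest_cut (exam_dict : List (String × List (String × List (String × List String)))) : Prop :=
  (((PySem.Dict.ofList exam_dict).get? "image_series").map (fun img =>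
    (!img.isEmpty) &&
    (PySem.Dict.ofList img).items.all (fun kv => ((PySem.Dict.ofList kv.2).get? "paths").isSome))).getD false = true
instance (exam_dict : List (String × List (String × List (String × List String)))) : Decidable (Pre_get_thinnest_cut exam_dict) := by unfold Pre_get_thinnest_cut; infer_instance

def pvWitness_get_thinnest_cut : (List (String × List (String × List (String × List String)))) :=
  [("image_series", [("s1", [("paths", ["a", "b"])]), ("s2", [("paths", ["c"])])])]

def Spec_get_thinnest_cut (exam_dict : List (String × List (String × List (String × List String)))) (out : String) : Prop := out = get_thinnest_cut_alt exam_dict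
instance (exam_dict : List (String × List (String × List (String × List String)))) (out : String) : Decidable (Spec_get_thinnest_cut exam_dict out) := by unfold Spec_get_thinnest_cut; infer_instance

-- ===== CLAIM (what is proved, stated in full; the proofs are below) =====
def Claim_equal_get_thinnest_cut : Prop := ∀ (exam_dict : List (String × List (String × List (String × List String)))), Dom_get_thinnest_cut exam_dict → Pre_get_thinnest_cut exam_dict → Spec_get_thinnest_cut exam_dict (get_thinnest_cut exam_dict)

-- ===== LEMMAS AND PROOFS =====

-- the Option-valued first-max fold inside max? is the plain first-max fold once seeded
theorem pv_max?_cons {α : Type} (f : α → Nat) (x : α) (t : List α) :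
    PySem.List.max? (x :: t) f = some (t.foldl (fun b y => if f b < f y then y else b) x) := by
  unfold PySem.List.max?
  rw [List.foldl_cons]
  induction t generalizing x with
  | nil => rfl
  | cons y t ih =>
    rw [List.foldl_cons, List.foldl_cons]
    by_cases h : f x < f y <;> simp [h, ih]

-- inserting into a nonempty list: the head becomes x exactly when x must go first
theorem pv_insertBy_head {α : Type} (bef : α → α → Bool) (x h : α) (t : List α) :
    (PySem.List.insertBy bef x (h :: t)).head? = some (if bef x h then x else h) := by
  simp only [PySem.List.insertBy]
  split_ifs with hb <;> simp

-- invariant of the insertion-sort fold: the head of the accumulator is the running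
-- first-max (first-wins strict comparison) of the elements folded in so far
theorem pv_fold_insert_head {α : Type} (bef : α → α → Bool) :
    ∀ (t acc : List α) (h : α), acc.head? = some h →
      (t.foldl (fun acc x => PySem.List.insertBy bef x acc) acc).head?
        = some (t.foldl (fun b y => if bef y b then y else b) h) := by
  intro t
  induction t with
  | nil => intro acc h hh; simpa using hh
  | cons x t ih =>
    intro acc h hh
    cases acc with
    | nil => simp at hh
    | cons a r =>
      simp only [List.head?_cons, Option.some.injEq] at hh
      subst hh
      rw [List.foldl_cons, List.foldl_cons]
      exact ih _ _ (pv_insertBy_head bef x a r)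

-- head of the stable descending sort = first element attaining the maximal key
theorem pv_sorted_rev_head {α : Type} (l : List α) (f : α → Nat) :
    (PySem.List.sorted l f true).head? = PySem.List.max? l f := by
  rw [PySem.List.sorted_rev_eq_foldl_insertBy]
  cases l with
  | nil => rfl
  | cons x t =>
    rw [List.foldl_cons, pv_max?_cons]
    have h0 : (PySem.List.insertBy (fun a b => decide (f b < f a)) x []).head? = some x := by
      simp [PySem.List.insertBy]
    rw [pv_fold_insert_head _ t _ x h0]
    simp

-- invariant of the argmax fold: its result is the first element attaining the maximal key
theorem pv_fold_first {α : Type} (f : α → Nat) (t : List α) :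
    ∀ (a m : α), t.foldl (fun b y => if f b < f y then y else b) a = m →
      (m = a ∧ f a = f m) ∨ (f a < f m ∧ (t.filter (fun x => f x == f m)).head? = some m) := by
  induction t with
  | nil => intro a m h; simp at h; exact Or.inl ⟨h.symm, by rw [h]⟩
  | cons x t ih =>
    intro a m h
    rw [List.foldl_cons] at h
    by_cases hax : f a < f x
    · rw [if_pos hax] at h
      rcases ih x m h with ⟨rfl, hfx⟩ | ⟨hlt, hhd⟩
      · exact Or.inr ⟨hax, by simp⟩
      · refine Or.inr ⟨lt_trans hax hlt, ?_⟩
        have hne : (f x == f m) = false := by simp [Nat.ne_of_lt hlt]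
        simp [hne, hhd]
    · rw [if_neg hax] at h
      rcases ih a m h with hl | ⟨hlt, hhd⟩
      · exact Or.inl hl
      · refine Or.inr ⟨hlt, ?_⟩
        have hne : (f x == f m) = false := by
          have : f x < f m := lt_of_le_of_lt (le_of_not_gt hax) hlt
          simp [Nat.ne_of_lt this]
        simp [hne, hhd]

-- A's max-then-filter-head pipeline picks exactly the first maximal element
theorem pv_max?_filter_head {α : Type} (l : List α) (f : α → Nat) (m : α)
    (h : PySem.List.max? l f = some m) :
    (l.filter (fun x => f x == f m)).head? = some m := by
  cases l with
  | nil => simp [PySem.List.max?] at h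
  | cons x t =>
    rw [pv_max?_cons] at h
    injection h with h
    rcases pv_fold_first f t x m h with ⟨rfl, _⟩ | ⟨hlt, hhd⟩
    · simp
    · have hne : (f x == f m) = false := by simp [Nat.ne_of_lt hlt]
      simp [hne, hhd]

-- the running-max fold on the mapped lengths is the image of the running argmax fold
theorem pv_fold_map_comm {α β : Type} (g1 : Option β → β → Option β) (g2 : Option α → α → Option α)
    (f : α → β) (h : ∀ acc x, g1 (acc.map f) (f x) = (g2 acc x).map f) :
    ∀ (t : List α) (acc : Option α),
      List.foldl g1 (acc.map f) (t.map f) = (List.foldl g2 acc t).map f := by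
  intro t
  induction t with
  | nil => intro acc; rfl
  | cons x t ih => intro acc; rw [List.map_cons, List.foldl_cons, List.foldl_cons, h, ih]

theorem pv_max?_map {α : Type} (l : List α) (f : α → Nat) :
    PySem.List.max? (l.map f) (fun x => x) = (PySem.List.max? l f).map f := by
  unfold PySem.List.max?
  beta_reduce
  refine pv_fold_map_comm _ _ f (fun acc x => ?_) l none
  cases acc with
  | none => rfl
  | some a => simp only [Option.map_some]; split_ifs <;> rfl

-- ===== VERDICT (by name: the statement is the Claim_ definition above) =====
theorem get_thinnest_cut_spec : Claim_equal_get_thinnest_cut := by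
  intro exam_dict _ _
  unfold Spec_get_thinnest_cut get_thinnest_cut get_thinnest_cut_alt
  cases hget : (PySem.Dict.ofList exam_dict).get? "image_series" with
  | none => rfl
  | some img =>
    simp only
    rw [pv_max?_map (PySem.Dict.ofList img).items (fun kv => pvPathsLen kv.2)]
    have hb : PySem.List.pyGet?
        (PySem.List.sorted (PySem.Dict.ofList img).items (fun kv => pvPathsLen kv.2) true) 0
        = PySem.List.max? (PySem.Dict.ofList img).items (fun kv => pvPathsLen kv.2) := by
      rw [← pv_sorted_rev_head]
      cases PySem.List.sorted (PySem.Dict.ofList img).items (fun kv => pvPathsLen kv.2) true with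
      | nil => rfl
      | cons y ys => simp [PySem.List.pyGet?, PySem.List.pyIdx?]
    rw [hb]
    cases hmax : PySem.List.max? (PySem.Dict.ofList img).items (fun kv => pvPathsLen kv.2) with
    | none => rfl
    | some kv =>
      simp only [Option.map_some]
      have hhd := pv_max?_filter_head (PySem.Dict.ofList img).items (fun kv => pvPathsLen kv.2) kv hmax
      cases hf : ((PySem.Dict.ofList img).items.filter (fun kv' => pvPathsLen kv'.2 == pvPathsLen kv.2)) with
      | nil => rw [hf] at hhd; simp at hhd
      | cons y ys =>
        rw [hf] at hhd
        simp only [List.head?_cons, Option.some.injEq] at hhd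
        simp [hhd]
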